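-- pv_equiv track=rewrite | github.com/kaddu341/ML_4_RDMs | src/jobs/filling1_6x6_8x8_trial1_july4/utils.py | get_simple_coords
-- ===== SOURCE A (Python) =====
-- from typing import List, Tuple
--
-- def get_simple_coords(n: int) -> Tuple[List[int], List[int]]:
--     x_coords = []
--     y_coords = []
--     for i in range(n):
--         for j in range(n):
--             x_coords.append(i)
--             y_coords.append(j)
--     return x_coords, y_coords
-- ===== SOURCE B (Python) =====
-- def get_simple_coords(n):
--     m = max(n, 0)
--     x_coords = [k // m for k in range(m * m)]
--     y_coords = [k % m for k in range(m * m)]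
--     return x_coords, y_coords
-- ===== Notes on version B (the rewrite author's own statement) =====
-- stated objective: alternative
-- what changed: Replaces the two nested appending loops with two flat comprehensions over range(m*m) that recover the row via k//m and the column via k%m (m = max(n,0) keeps the range empty for negative n).
import Mathlib
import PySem

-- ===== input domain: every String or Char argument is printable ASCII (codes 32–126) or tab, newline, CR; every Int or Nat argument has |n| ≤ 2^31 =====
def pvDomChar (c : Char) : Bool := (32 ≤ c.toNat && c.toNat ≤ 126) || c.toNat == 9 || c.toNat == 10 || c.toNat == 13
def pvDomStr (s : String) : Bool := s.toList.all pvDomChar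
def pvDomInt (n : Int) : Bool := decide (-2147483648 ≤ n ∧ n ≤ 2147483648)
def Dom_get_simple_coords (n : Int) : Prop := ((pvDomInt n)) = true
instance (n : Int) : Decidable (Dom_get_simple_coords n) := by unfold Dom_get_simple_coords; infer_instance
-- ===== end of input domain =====

-- B replaces A's nested appending loops with two flat divmod comprehensions over range(m*m), m = max(n,0); alternative decomposition, same cost.

-- ===== PORT A =====
def get_simple_coords (n : Int) : List Int × List Int :=
  (PySem.List.pyRange 0 n 1).foldl
    (fun acc i =>
      (PySem.List.pyRange 0 n 1).foldl
        (fun acc2 j => (acc2.1 ++ [i], acc2.2 ++ [j])) acc)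
    ([], [])

-- ===== PORT B =====
def get_simple_coords_alt (n : Int) : List Int × List Int :=
  let m := max n 0
  ((PySem.List.pyRange 0 (m * m) 1).map (fun k => PySem.Int.floordiv k m),
   (PySem.List.pyRange 0 (m * m) 1).map (fun k => PySem.Int.mod k m))

-- ===== PRECONDITION & SPEC =====
def Spec_get_simple_coords (n : Int) (out : List Int × List Int) : Prop := out = get_simple_coords_alt n
instance (n : Int) (out : List Int × List Int) : Decidable (Spec_get_simple_coords n out) := by unfold Spec_get_simple_coords; infer_instance

-- ===== CLAIM (what is proved, stated in full; the proofs are below) =====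
def Claim_equal_get_simple_coords : Prop := ∀ (n : Int), Dom_get_simple_coords n → Spec_get_simple_coords n (get_simple_coords n)

-- ===== LEMMAS AND PROOFS =====

theorem pyRange_zero_toNat (n : Int) :
    PySem.List.pyRange 0 n 1 = (List.range n.toNat).map (fun (k : Nat) => (k : Int)) := by
  rcases (by omega : n ≤ 0 ∨ 0 < n) with h | h
  · rw [PySem.List.pyRange_one_eq_nil h]
    have hz : n.toNat = 0 := by omega
    simp [hz]
  · have hc : n = (n.toNat : Int) := by omega
    conv_lhs => rw [hc, PySem.List.pyRange_zero_natCast]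

-- A's inner loop appends i to the first list and each j to the second
theorem inner_fold_eq (L : List Int) (i : Int) :
    ∀ (acc : List Int × List Int),
      L.foldl (fun acc2 j => (acc2.1 ++ [i], acc2.2 ++ [j])) acc
        = (acc.1 ++ L.map (fun _ => i), acc.2 ++ L) := by
  induction L with
  | nil => simp
  | cons h t ih => intro acc; simp [ih]

-- A's nested loops are a pair of flatMaps
theorem nested_fold_eq (R L : List Int) :
    ∀ (acc : List Int × List Int),
      R.foldl (fun acc i =>
          L.foldl (fun acc2 j => (acc2.1 ++ [i], acc2.2 ++ [j])) acc) acc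
        = (acc.1 ++ R.flatMap (fun i => L.map (fun _ => i)), acc.2 ++ R.flatMap (fun _ => L)) := by
  induction R with
  | nil => simp
  | cons r t ih => intro acc; rw [List.foldl_cons, inner_fold_eq, ih]; simp

theorem range_mul_flatMap (N : Nat) :
    ∀ t : Nat, List.range (t * N)
      = (List.range t).flatMap (fun i => (List.range N).map (fun j => i * N + j)) := by
  intro t
  induction t with
  | zero => simp
  | succ t ih =>
      rw [Nat.succ_mul, List.range_add, ih, List.range_succ]
      simp

theorem portA_eq (n : Int) :
    get_simple_coords n
      = ((List.range n.toNat).flatMap (fun (i : Nat) => List.replicate n.toNat ((i : Int))),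
         (List.range n.toNat).flatMap (fun _ => (List.range n.toNat).map (fun (k : Nat) => (k : Int)))) := by
  unfold get_simple_coords
  rw [pyRange_zero_toNat, nested_fold_eq]
  simp only [List.nil_append, List.flatMap_map, List.map_map, Function.comp_def,
    List.map_const', List.length_range]

theorem portB_eq (n : Int) :
    get_simple_coords_alt n
      = ((List.range n.toNat).flatMap (fun (i : Nat) => List.replicate n.toNat ((i : Int))),
         (List.range n.toNat).flatMap (fun _ => (List.range n.toNat).map (fun (k : Nat) => (k : Int)))) := by
  have hm : max n 0 = ((n.toNat : Nat) : Int) := by omega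
  set N := n.toNat with hN
  have hmm : ((N : Int) * (N : Int)) = ((N * N : Nat) : Int) := by push_cast; ring
  simp only [get_simple_coords_alt, hm, hmm]
  rw [pyRange_zero_toNat]
  simp only [Int.toNat_natCast]
  rw [range_mul_flatMap N N]
  simp only [List.map_flatMap, List.map_map, Function.comp_def,
    PySem.Int.floordiv_natCast, PySem.Int.mod_natCast]
  simp only [Prod.mk.injEq]
  refine ⟨?_, ?_⟩
  · apply List.flatMap_congr; intro i _
    have hrep : List.replicate N ((i : Int)) = (List.range N).map (fun _ => (i : Int)) := by
      rw [List.map_const', List.length_range]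
    rw [hrep]
    apply List.map_congr_left; intro j hj
    have hjN : j < N := List.mem_range.mp hj
    have hNpos : 0 < N := Nat.lt_of_le_of_lt (Nat.zero_le j) hjN
    have hdiv : (i * N + j) / N = i := by
      rw [Nat.mul_comm i N, Nat.mul_add_div hNpos, Nat.div_eq_of_lt hjN, Nat.add_zero]
    rw [hdiv]
  · apply List.flatMap_congr; intro i _
    apply List.map_congr_left; intro j hj
    have hjN : j < N := List.mem_range.mp hj
    have hmod : (i * N + j) % N = j := by
      rw [Nat.mul_comm i N, Nat.mul_add_mod, Nat.mod_eq_of_lt hjN]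
    rw [hmod]

-- ===== VERDICT (by name: the statement is the Claim_ definition above) =====
theorem get_simple_coords_spec : Claim_equal_get_simple_coords := by
  intro n _
  unfold Spec_get_simple_coords
  rw [portA_eq, portB_eq]
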